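-- pv_equiv track=rewrite | github.com/fhenwood/audiobook-creator | audiobook/tts/engines/maya.py | _unpack_snac_from_7
-- ===== SOURCE A (Python) =====
-- from typing import List, Optional, Dict, Any, Union
--
-- CODE_END_TOKEN_ID = 128258
--
-- CODE_TOKEN_OFFSET = 128266
--
-- SNAC_TOKENS_PER_FRAME = 7
--
-- def _unpack_snac_from_7(vocab_ids: List[int]) -> List[List[int]]:
--     """Unpack 7-token SNAC frames to 3 hierarchical levels."""
--     # Remove EOS token if present
--     if vocab_ids and vocab_ids[-1] == CODE_END_TOKEN_ID:
--         vocab_ids = vocab_ids[:-1]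
--
--     # Ensure complete frames
--     frames = len(vocab_ids) // SNAC_TOKENS_PER_FRAME
--     vocab_ids = vocab_ids[:frames * SNAC_TOKENS_PER_FRAME]
--
--     if frames == 0:
--         return [[], [], []]
--
--     l1, l2, l3 = [], [], []
--
--     for i in range(frames):
--         slots = vocab_ids[i*7:(i+1)*7]
--
--         # Subtract offset and mod 4096 to get original SNAC codes
--         l1.append((slots[0] - CODE_TOKEN_OFFSET) % 4096)
--         l2.extend([
--             (slots[1] - CODE_TOKEN_OFFSET) % 4096,  # Even
--             (slots[4] - CODE_TOKEN_OFFSET) % 4096,  # Odd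
--         ])
--         l3.extend([
--             (slots[2] - CODE_TOKEN_OFFSET) % 4096,
--             (slots[3] - CODE_TOKEN_OFFSET) % 4096,
--             (slots[5] - CODE_TOKEN_OFFSET) % 4096,
--             (slots[6] - CODE_TOKEN_OFFSET) % 4096,
--         ])
--
--     return [l1, l2, l3]
-- ===== SOURCE B (Python) =====
-- from typing import List
--
-- CODE_END_TOKEN_ID = 128258
-- CODE_TOKEN_OFFSET = 128266
-- SNAC_TOKENS_PER_FRAME = 7
--
--
-- def _unpack_snac_from_7(vocab_ids: List[int]) -> List[List[int]]:
--     """Unpack 7-token SNAC frames to 3 hierarchical levels (strided-slice version)."""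
--     if vocab_ids and vocab_ids[-1] == CODE_END_TOKEN_ID:
--         vocab_ids = vocab_ids[:-1]
--
--     # Keep only complete frames, then normalise every token once.
--     n = len(vocab_ids) - len(vocab_ids) % SNAC_TOKENS_PER_FRAME
--     codes = [(v - CODE_TOKEN_OFFSET) % 4096 for v in vocab_ids[:n]]
--
--     l1 = codes[0::7]
--     l2 = [c for pair in zip(codes[1::7], codes[4::7]) for c in pair]
--     l3 = [c for quad in zip(codes[2::7], codes[3::7], codes[5::7], codes[6::7]) for c in quad]
--     return [l1, l2, l3]
-- ===== Notes on version B (the rewrite author's own statement) =====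
-- stated objective: alternative
-- what changed: Replaces A's frame-by-frame loop that appends into three accumulators with a single normalisation pass (one map) followed by strided slices codes[k::7] interleaved via zip to form the three levels.
import Mathlib
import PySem

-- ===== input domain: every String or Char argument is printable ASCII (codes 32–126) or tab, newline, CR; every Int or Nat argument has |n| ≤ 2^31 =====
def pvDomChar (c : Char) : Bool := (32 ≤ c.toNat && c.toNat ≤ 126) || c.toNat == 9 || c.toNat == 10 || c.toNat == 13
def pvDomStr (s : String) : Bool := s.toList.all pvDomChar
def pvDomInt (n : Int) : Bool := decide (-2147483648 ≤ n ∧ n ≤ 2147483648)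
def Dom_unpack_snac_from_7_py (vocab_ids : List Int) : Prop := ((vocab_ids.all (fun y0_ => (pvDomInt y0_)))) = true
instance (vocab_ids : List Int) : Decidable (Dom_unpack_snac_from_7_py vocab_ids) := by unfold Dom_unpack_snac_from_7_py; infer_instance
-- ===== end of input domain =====

-- B replaces A's frame-by-frame loop with three strided slices over a once-normalised
-- flat code list (objective: simpler decomposition, no speed claim).

-- ===== PORT A =====
-- literal transliteration of A: EOS trim, truncate to complete frames, then a loop
-- over range(frames) appending to three accumulators from each 7-slot slice
def unpack_snac_from_7_py (vocab_ids : List Int) : List (List Int) :=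
  let vocab_ids :=
    if vocab_ids ≠ [] ∧ PySem.List.pyGetD vocab_ids (-1) 0 = 128258 then
      PySem.List.slice vocab_ids none (some (-1))
    else vocab_ids
  let frames : Int := PySem.Int.floordiv (vocab_ids.length : Int) 7
  let vocab_ids := PySem.List.slice vocab_ids none (some (frames * 7))
  if frames = 0 then [[], [], []]
  else
    let st := (PySem.List.pyRange 0 frames 1).foldl
      (fun (s : List Int × List Int × List Int) i =>
        let slots := PySem.List.slice vocab_ids (some (i * 7)) (some ((i + 1) * 7))
        let g := fun (k : Int) => PySem.Int.mod (PySem.List.pyGetD slots k 0 - 128266) 4096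
        (s.1 ++ [g 0], s.2.1 ++ [g 1, g 4], s.2.2 ++ [g 2, g 3, g 5, g 6]))
      ([], [], [])
    [st.1, st.2.1, st.2.2]

-- ===== PORT B =====
-- codes[k::7] (slice with step 7), transcribed by hand; exact for any list and step 7
def bstride (xs : List Int) : List Int :=
  match xs with
  | [] => []
  | x :: rest => x :: bstride (rest.drop 6)
termination_by xs.length
decreasing_by simp

def unpack_snac_from_7_py_alt (vocab_ids : List Int) : List (List Int) :=
  let vocab_ids :=
    if vocab_ids ≠ [] ∧ PySem.List.pyGetD vocab_ids (-1) 0 = 128258 then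
      PySem.List.slice vocab_ids none (some (-1))
    else vocab_ids
  let n : Int := (vocab_ids.length : Int) - PySem.Int.mod (vocab_ids.length : Int) 7
  let codes := (PySem.List.slice vocab_ids none (some n)).map
    (fun v => PySem.Int.mod (v - 128266) 4096)
  let l1 := bstride codes
  let l2 := ((bstride (codes.drop 1)).zip (bstride (codes.drop 4))).flatMap
    (fun p => [p.1, p.2])
  let l3 := (((bstride (codes.drop 2)).zip (bstride (codes.drop 3))).zip
             ((bstride (codes.drop 5)).zip (bstride (codes.drop 6)))).flatMap
    (fun q => [q.1.1, q.1.2, q.2.1, q.2.2])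
  [l1, l2, l3]

-- ===== PRECONDITION & SPEC =====
def Spec_unpack_snac_from_7_py (vocab_ids : List Int) (out : List (List Int)) : Prop := out = unpack_snac_from_7_py_alt vocab_ids
instance (vocab_ids : List Int) (out : List (List Int)) : Decidable (Spec_unpack_snac_from_7_py vocab_ids out) := by unfold Spec_unpack_snac_from_7_py; infer_instance

-- ===== CLAIM (what is proved, stated in full; the proofs are below) =====
def Claim_equal_unpack_snac_from_7_py : Prop := ∀ (vocab_ids : List Int), Dom_unpack_snac_from_7_py vocab_ids → Spec_unpack_snac_from_7_py vocab_ids (unpack_snac_from_7_py vocab_ids)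


-- ===== LEMMAS AND PROOFS =====

def gA (v : Int) : Int := PySem.Int.mod (v - 128266) 4096
def gmap (t : List Int) : List Int := t.map gA
def L1 (t : List Int) : List Int := bstride (gmap t)
def L2 (t : List Int) : List Int :=
  ((bstride ((gmap t).drop 1)).zip (bstride ((gmap t).drop 4))).flatMap (fun p => [p.1, p.2])
def L3 (t : List Int) : List Int :=
  (((bstride ((gmap t).drop 2)).zip (bstride ((gmap t).drop 3))).zip
   ((bstride ((gmap t).drop 5)).zip (bstride ((gmap t).drop 6)))).flatMap
    (fun q => [q.1.1, q.1.2, q.2.1, q.2.2])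

lemma L1_cons7 (a b c d e f g7 : Int) (rest : List Int) :
    L1 (a::b::c::d::e::f::g7::rest) = gA a :: L1 rest := by
  simp [L1, gmap, bstride]

lemma L2_cons7 (a b c d e f g7 : Int) (rest : List Int) :
    L2 (a::b::c::d::e::f::g7::rest) = gA b :: gA e :: L2 rest := by
  simp [L2, gmap, bstride]

lemma L3_cons7 (a b c d e f g7 : Int) (rest : List Int) :
    L3 (a::b::c::d::e::f::g7::rest) = gA c :: gA d :: gA f :: gA g7 :: L3 rest := by
  simp [L3, gmap, bstride]

lemma sliceStep (t : List Int) (k : Nat) :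
    PySem.List.slice t (some ((1 + (k:Int)) * 7)) (some ((1 + (k:Int) + 1) * 7))
      = PySem.List.slice (t.drop 7) (some ((k:Int) * 7)) (some (((k:Int) + 1) * 7)) := by
  have h1 : (1 + (k:Int)) * 7 = ((7 + 7*k : Nat) : Int) := by push_cast; ring
  have h2 : (1 + (k:Int) + 1) * 7 = ((14 + 7*k : Nat) : Int) := by push_cast; ring
  have h3 : ((k:Int)) * 7 = ((7*k : Nat) : Int) := by push_cast; ring
  have h4 : ((k:Int) + 1) * 7 = ((7 + 7*k : Nat) : Int) := by push_cast; ring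
  rw [h1, h2, h3, h4, PySem.List.slice_natCast, PySem.List.slice_natCast, List.drop_drop]
  congr 1; omega

lemma loopA (n : Nat) (t : List Int) (a1 a2 a3 : List Int) (ht : t.length = 7 * n) :
    (PySem.List.pyRange 0 (n : Int) 1).foldl
      (fun (s : List Int × List Int × List Int) (i : Int) =>
        (s.1 ++ [PySem.Int.mod (PySem.List.pyGetD (PySem.List.slice t (some (i*7)) (some ((i+1)*7))) 0 0 - 128266) 4096],
         s.2.1 ++ [PySem.Int.mod (PySem.List.pyGetD (PySem.List.slice t (some (i*7)) (some ((i+1)*7))) 1 0 - 128266) 4096,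
                   PySem.Int.mod (PySem.List.pyGetD (PySem.List.slice t (some (i*7)) (some ((i+1)*7))) 4 0 - 128266) 4096],
         s.2.2 ++ [PySem.Int.mod (PySem.List.pyGetD (PySem.List.slice t (some (i*7)) (some ((i+1)*7))) 2 0 - 128266) 4096,
                   PySem.Int.mod (PySem.List.pyGetD (PySem.List.slice t (some (i*7)) (some ((i+1)*7))) 3 0 - 128266) 4096,
                   PySem.Int.mod (PySem.List.pyGetD (PySem.List.slice t (some (i*7)) (some ((i+1)*7))) 5 0 - 128266) 4096,
                   PySem.Int.mod (PySem.List.pyGetD (PySem.List.slice t (some (i*7)) (some ((i+1)*7))) 6 0 - 128266) 4096]))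
      (a1, a2, a3)
    = (a1 ++ L1 t, a2 ++ L2 t, a3 ++ L3 t) := by
  induction n generalizing t a1 a2 a3 with
  | zero =>
      have : t = [] := by cases t <;> simp_all
      subst this
      simp [PySem.List.pyRange_one_eq_nil (by omega : (0:Int) ≤ 0), L1, L2, L3, gmap, bstride]
  | succ n ih =>
      match t, ht with
      | a::b::c::d::e::f::g7::rest, ht =>
        have hrest : rest.length = 7 * n := by simp at ht; omega
        rw [show ((n+1 : Nat) : Int) = (n:Int) + 1 by push_cast; ring] at *
        rw [PySem.List.pyRange_one_cons (by omega), List.foldl_cons]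
        have hslots : PySem.List.slice (a::b::c::d::e::f::g7::rest) (some ((0:Int)*7)) (some (((0:Int)+1)*7)) = [a,b,c,d,e,f,g7] := by
          rw [show ((0:Int)*7) = ((0:Nat):Int) by norm_num,
              show (((0:Int)+1)*7) = ((7:Nat):Int) by norm_num, PySem.List.slice_natCast]
          rfl
        have hdrop : (a::b::c::d::e::f::g7::rest).drop 7 = rest := rfl
        have hrange : PySem.List.pyRange (0+1) ((n:Int)+1) 1
            = (List.range n).map (fun k : Nat => ((1:Int) + (k:Int))) := by
          rw [show ((0:Int)+1) = 1 by ring, PySem.List.pyRange_one,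
              show ((n:Int)+1-1).toNat = n by omega]
        rw [hrange, List.foldl_map, hslots]
        simp only [sliceStep, hdrop]
        have e0 : PySem.List.pyGetD [a,b,c,d,e,f,g7] (0:Int) 0 = a := by
          simp [PySem.List.pyGetD, PySem.List.pyGet?, PySem.List.pyIdx?]
        have e1 : PySem.List.pyGetD [a,b,c,d,e,f,g7] (1:Int) 0 = b := by
          simp [PySem.List.pyGetD, PySem.List.pyGet?, PySem.List.pyIdx?]
        have e2 : PySem.List.pyGetD [a,b,c,d,e,f,g7] (2:Int) 0 = c := by
          simp [PySem.List.pyGetD, PySem.List.pyGet?, PySem.List.pyIdx?]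
        have e3 : PySem.List.pyGetD [a,b,c,d,e,f,g7] (3:Int) 0 = d := by
          simp [PySem.List.pyGetD, PySem.List.pyGet?, PySem.List.pyIdx?]
        have e4 : PySem.List.pyGetD [a,b,c,d,e,f,g7] (4:Int) 0 = e := by
          simp [PySem.List.pyGetD, PySem.List.pyGet?, PySem.List.pyIdx?]
        have e5 : PySem.List.pyGetD [a,b,c,d,e,f,g7] (5:Int) 0 = f := by
          simp [PySem.List.pyGetD, PySem.List.pyGet?, PySem.List.pyIdx?]
        have e6 : PySem.List.pyGetD [a,b,c,d,e,f,g7] (6:Int) 0 = g7 := by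
          simp [PySem.List.pyGetD, PySem.List.pyGet?, PySem.List.pyIdx?]
        have ih' := ih rest (a1 ++ [gA a]) (a2 ++ [gA b, gA e]) (a3 ++ [gA c, gA d, gA f, gA g7]) hrest
        rw [PySem.List.pyRange_one, show ((n:Int)-0).toNat = n by omega, List.foldl_map] at ih'
        simp only [zero_add] at ih'
        simp only [gA] at ih'
        rw [e0, e1, e2, e3, e4, e5, e6, L1_cons7, L2_cons7, L3_cons7]
        rw [ih']
        simp [gA, List.append_assoc]

-- ===== VERDICT (by name: the statement is the Claim_ definition above) =====
theorem unpack_snac_from_7_py_spec : Claim_equal_unpack_snac_from_7_py := by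
  intro v _
  unfold Spec_unpack_snac_from_7_py
  simp only [unpack_snac_from_7_py, unpack_snac_from_7_py_alt]
  set t := (if v ≠ [] ∧ PySem.List.pyGetD v (-1) 0 = 128258 then PySem.List.slice v none (some (-1)) else v) with ht
  have hfd : PySem.Int.floordiv (t.length : Int) 7 = ((t.length / 7 : Nat) : Int) := by
    exact_mod_cast PySem.Int.floordiv_natCast t.length 7
  have hmd : PySem.Int.mod (t.length : Int) 7 = ((t.length % 7 : Nat) : Int) := by
    exact_mod_cast PySem.Int.mod_natCast t.length 7
  rw [hfd, hmd]
  have hslice : PySem.List.slice t none (some (((t.length/7 : Nat):Int) * 7)) = t.take (7 * (t.length/7)) := by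
    rw [show (((t.length/7 : Nat):Int) * 7) = ((7*(t.length/7) : Nat) : Int) by push_cast; ring,
        PySem.List.slice_to_natCast]
  have hslice2 : PySem.List.slice t none (some ((t.length : Int) - ((t.length % 7 : Nat):Int)))
      = t.take (7 * (t.length/7)) := by
    rw [show ((t.length:Int) - ((t.length % 7:Nat):Int)) = ((7*(t.length/7) : Nat):Int) by push_cast; omega,
        PySem.List.slice_to_natCast]
  rw [hslice, hslice2]
  by_cases h0 : t.length / 7 = 0
  · simp [h0, bstride]
  · rw [if_neg (by exact_mod_cast h0)]
    have hlen : (t.take (7 * (t.length/7))).length = 7 * (t.length/7) := by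
      simp; omega
    rw [loopA (t.length/7) (t.take (7 * (t.length/7))) [] [] [] hlen]
    simp only [L1, L2, L3, gmap, show gA = fun v => PySem.Int.mod (v - 128266) 4096 from rfl,
      List.nil_append]
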